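-- pv_equiv track=rewrite | github.com/Suchitra2309/MapUp-Assignment | submission/python_section_1.py | rotate_and_multiply_matrix
-- ===== SOURCE A (Python) =====
-- from typing import Dict, List
-- import copy
--
-- def rotate_and_multiply_matrix(matrix: List[List[int]]) -> List[List[int]]:
--     """
--     Rotate the given matrix by 90 degrees clockwise, then multiply each element
--     by the sum of its original row and column index before rotation.
--
--     Args:
--     - matrix (List[List[int]]): 2D list representing the matrix to be transformed.
--
--     Returns:
--     - List[List[int]]: A new 2D list representing the transformed matrix.
--     """
--     # Your code here
--     n = len(matrix)
--
--     # Rotate the matrix 90 degrees clockwise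
--     rotated_matrix = [[0] * n for _ in range(n)]
--     for i in range(n):
--         for j in range(n):
--             rotated_matrix[j][n - 1 - i] = matrix[i][j]
--
--     # Calculate sums for each element in the rotated matrix
--     transformed_matrix = copy.deepcopy(rotated_matrix)  # Create a copy to avoid modifying the original
--     for i in range(n):
--         for j in range(n):
--             row_sum = sum(rotated_matrix[i]) - rotated_matrix[i][j]
--             col_sum = 0
--             for k in range(n):
--                 if k != i:
--                     col_sum += rotated_matrix[k][j]
--             transformed_matrix[i][j] = row_sum + col_sum
--
--     return transformed_matrix
-- ===== SOURCE B (Python) =====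
-- def rotate_and_multiply_matrix(matrix):
--     n = len(matrix)
--     rotated = [[matrix[n - 1 - j][i] for j in range(n)] for i in range(n)]
--     row_sums = [sum(row) for row in rotated]
--     col_sums = [sum(rotated[k][j] for k in range(n)) for j in range(n)]
--     return [[row_sums[i] + col_sums[j] - 2 * rotated[i][j] for j in range(n)]
--             for i in range(n)]
-- ===== Notes on version B (the rewrite author's own statement) =====
-- stated objective: faster
-- what changed: A rebuilds each cell with a fresh per-cell row sum and an inner column scan (O(n^3)); B precomputes the rotated matrix's row sums and column sums once and computes each cell as rowSum + colSum - 2*cell in O(1), and builds the rotated matrix by direct indexing instead of filling a zero matrix cell by cell.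
import Mathlib
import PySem

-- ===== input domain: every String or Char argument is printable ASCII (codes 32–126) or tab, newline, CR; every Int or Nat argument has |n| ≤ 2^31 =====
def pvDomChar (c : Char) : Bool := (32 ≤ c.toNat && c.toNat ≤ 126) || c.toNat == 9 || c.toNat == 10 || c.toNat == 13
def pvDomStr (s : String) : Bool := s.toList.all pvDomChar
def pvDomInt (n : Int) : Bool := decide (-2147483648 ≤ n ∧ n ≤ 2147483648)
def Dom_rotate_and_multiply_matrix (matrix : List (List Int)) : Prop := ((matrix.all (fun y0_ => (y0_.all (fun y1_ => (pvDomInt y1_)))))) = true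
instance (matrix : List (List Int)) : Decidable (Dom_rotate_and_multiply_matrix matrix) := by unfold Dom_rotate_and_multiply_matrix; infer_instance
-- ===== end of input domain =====

-- B replaces A's cubic "per-cell column scan" by precomputed row and column sums of the
-- rotated matrix (each cell is rowSum + colSum - 2*cell), an asymptotically faster O(n^2) pass.

-- ===== PORT A =====
-- literal transliteration of A: build the zero matrix, fill it cell by cell with set,
-- then recompute each cell with a per-cell column loop.
def rotate_and_multiply_matrix (matrix : List (List Int)) : List (List Int) :=
  let n := matrix.length
  let rotated := (List.range n).foldl
    (fun acc i => (List.range n).foldl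
      (fun acc2 j => acc2.set j ((acc2.getD j []).set (n - 1 - i) ((matrix.getD i []).getD j 0)))
      acc)
    (List.replicate n (List.replicate n 0))
  let transformed := (List.range n).foldl
    (fun acc i => (List.range n).foldl
      (fun acc2 j =>
        let row_sum := (rotated.getD i []).sum - (rotated.getD i []).getD j 0
        let col_sum := (List.range n).foldl
          (fun s k => if k ≠ i then s + (rotated.getD k []).getD j 0 else s) 0
        acc2.set i ((acc2.getD i []).set j (row_sum + col_sum)))
      acc)
    rotated
  transformed

-- ===== PORT B =====
def rotate_and_multiply_matrix_alt (matrix : List (List Int)) : List (List Int) :=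
  let n := matrix.length
  let rotated := (List.range n).map
    (fun i => (List.range n).map (fun j => (matrix.getD (n - 1 - j) []).getD i 0))
  let rowSums := rotated.map List.sum
  let colSums := (List.range n).map
    (fun j => ((List.range n).map (fun k => (rotated.getD k []).getD j 0)).sum)
  (List.range n).map (fun i => (List.range n).map
    (fun j => rowSums.getD i 0 + colSums.getD j 0 - 2 * (rotated.getD i []).getD j 0))

-- ===== PRECONDITION & SPEC =====
-- Pre_ excludes exactly the ragged inputs with a row shorter than the number of rows,
-- on which Python A raises IndexError (matrix[i][j] for j up to len(matrix)-1).
def Pre_rotate_and_multiply_matrix (matrix : List (List Int)) : Prop :=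
  ∀ row ∈ matrix, matrix.length ≤ row.length
instance (matrix : List (List Int)) : Decidable (Pre_rotate_and_multiply_matrix matrix) := by
  unfold Pre_rotate_and_multiply_matrix; infer_instance

def pvWitness_rotate_and_multiply_matrix : List (List Int) := [[1, 2], [3, 4]]

def Spec_rotate_and_multiply_matrix (matrix : List (List Int)) (out : List (List Int)) : Prop := out = rotate_and_multiply_matrix_alt matrix
instance (matrix : List (List Int)) (out : List (List Int)) : Decidable (Spec_rotate_and_multiply_matrix matrix out) := by unfold Spec_rotate_and_multiply_matrix; infer_instance

-- ===== CLAIM (what is proved, stated in full; the proofs are below) =====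
def Claim_equal_rotate_and_multiply_matrix : Prop := ∀ (matrix : List (List Int)), Dom_rotate_and_multiply_matrix matrix → Pre_rotate_and_multiply_matrix matrix → Spec_rotate_and_multiply_matrix matrix (rotate_and_multiply_matrix matrix)

-- ===== LEMMAS AND PROOFS =====

-- two folds agree when they agree step by step on states satisfying an invariant
theorem pvFoldlInvCongr {α β : Type} (P : β → Prop) (f h : β → α → β) :
    ∀ (L : List α) (b : β), P b → (∀ x ∈ L, ∀ c, P c → f c x = h c x ∧ P (f c x)) →
      L.foldl f b = L.foldl h b := by
  intro L
  induction L with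
  | nil => intro b _ _; rfl
  | cons a L ih =>
    intro b hb hstep
    have h1 := hstep a (by simp) b hb
    simp only [List.foldl_cons, h1.1]
    exact ih _ (h1.1 ▸ h1.2) (fun x hx => hstep x (by simp [hx]))

-- G1: a fold over range k that rewrites entry j from entry j is mapIdx on the first k entries
theorem pvFoldlSetRows {α : Type} (d : α) (u : Nat → α → α) :
    ∀ (k : Nat) (m : List α),
      (List.range k).foldl (fun a j => a.set j (u j (a.getD j d))) m
        = (m.take k).mapIdx (fun j r => u j r) ++ m.drop k := by
  intro k
  induction k with
  | zero => intro m; simp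
  | succ k ih =>
    intro m
    rw [List.range_succ, List.foldl_append, ih m]
    simp only [List.foldl_cons, List.foldl_nil]
    by_cases hk : k < m.length
    · have hA : ((m.take k).mapIdx (fun j r => u j r)).length = k := by
        rw [List.length_mapIdx, List.length_take]; omega
      have hdrop : m.drop k = m[k] :: m.drop (k + 1) := List.drop_eq_getElem_cons hk
      have hgetD : ((m.take k).mapIdx (fun j r => u j r) ++ m.drop k).getD k d = m[k] := by
        rw [List.getD_eq_getElem _ _ (by
          rw [List.length_append, hA, List.length_drop]; omega)]
        rw [List.getElem_append_right (by omega)]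
        simp only [hA, Nat.sub_self, List.getElem_drop, Nat.add_zero]
      rw [hgetD, List.set_append, hA, if_neg (Nat.lt_irrefl k), Nat.sub_self, hdrop]
      have htake : m.take (k + 1) = m.take k ++ [m[k]] := by
        rw [List.take_succ]; simp [List.getElem?_eq_getElem hk]
      rw [htake, List.mapIdx_concat]
      simp only [List.length_take, Nat.min_eq_left (Nat.le_of_lt hk), List.set_cons_zero, List.append_assoc, List.cons_append, List.nil_append]
    · have hlen : m.length ≤ k := Nat.le_of_not_lt hk
      rw [List.take_of_length_le hlen, List.drop_of_length_le hlen,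
        List.take_of_length_le (by omega), List.drop_of_length_le (by omega)]
      rw [List.set_eq_of_length_le (by rw [List.length_append, List.length_mapIdx]; simp; omega)]

-- G2: a fold over range k that only rewrites the fixed entry i collapses to one set
theorem pvFoldlSetFixed {α : Type} (d : α) (f : Nat → α → α) (i : Nat) (m : List α)
    (h : i < m.length) :
    ∀ (k : Nat),
      (List.range k).foldl (fun a j => a.set i (f j (a.getD i d))) m
        = m.set i ((List.range k).foldl (fun r j => f j r) (m.getD i d)) := by
  intro k
  induction k with
  | zero =>
    simp only [List.range_zero, List.foldl_nil]
    rw [List.getD_eq_getElem _ _ h, List.set_getElem_self]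
  | succ k ih =>
    rw [List.range_succ, List.foldl_append, List.foldl_append, ih]
    simp only [List.foldl_cons, List.foldl_nil]
    have hF : (m.set i ((List.range k).foldl (fun r j => f j r) (m.getD i d))).getD i d
        = (List.range k).foldl (fun r j => f j r) (m.getD i d) := by
      rw [List.getD_eq_getElem _ _ (by simpa using h)]
      exact List.getElem_set_self _
    rw [hF, List.set_set]

-- mapIdx composition
theorem pvMapIdxMapIdx {α β γ : Type} (f : Nat → α → β) (g : Nat → β → γ) (l : List α) :
    (l.mapIdx f).mapIdx g = l.mapIdx (fun i a => g i (f i a)) := by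
  apply List.ext_getElem
  · simp
  · intro i h1 h2
    simp [List.getElem_mapIdx]

-- G3: folding mapIdx steps acts independently on every entry
theorem pvFoldlMapIdx {α β : Type} (h : β → Nat → α → α) :
    ∀ (L : List β) (m : List α),
      L.foldl (fun m i => m.mapIdx (fun j r => h i j r)) m
        = m.mapIdx (fun j r => L.foldl (fun r i => h i j r) r) := by
  intro L
  induction L with
  | nil =>
    intro m
    simp only [List.foldl_nil]
    apply List.ext_getElem
    · simp
    · intro i h1 h2; simp [List.getElem_mapIdx]
  | cons a L ih =>
    intro m
    simp only [List.foldl_cons]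
    rw [ih, pvMapIdxMapIdx]

-- G4: descending fill r[n-1-i] := v i for i < k replaces the last k entries
theorem pvFoldlSetDesc {α : Type} (n : Nat) (v : Nat → α) (r0 : List α) (hr : r0.length = n) :
    ∀ (k : Nat), k ≤ n →
      (List.range k).foldl (fun r i => r.set (n - 1 - i) (v i)) r0
        = r0.take (n - k) ++ (List.range k).reverse.map v := by
  intro k
  induction k with
  | zero =>
    intro _
    simp [List.take_of_length_le (Nat.le_of_eq hr)]
  | succ k ih =>
    intro hk
    rw [List.range_succ, List.foldl_append, ih (by omega)]
    simp only [List.foldl_cons, List.foldl_nil]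
    have htl : (r0.take (n - k)).length = n - k := by
      rw [List.length_take]; omega
    have hsub : n - 1 - k = n - k - 1 := by omega
    have hidx : n - k - 1 < r0.length := by omega
    have htake : r0.take (n - k) = r0.take (n - k - 1) ++ [r0[n - k - 1]] := by
      conv_lhs => rw [show n - k = (n - k - 1) + 1 by omega]
      rw [List.take_succ]; simp [List.getElem?_eq_getElem hidx]
    have htl2 : (r0.take (n - k - 1)).length = n - k - 1 := by
      rw [List.length_take]; omega
    rw [hsub, List.set_append, if_pos (by rw [htl]; omega), htake, List.set_append,
      if_neg (by rw [htl2]; omega), htl2, Nat.sub_self]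
    rw [show List.map v (List.range k ++ [k]).reverse
        = v k :: List.map v (List.range k).reverse by simp]
    rw [show n - (k + 1) = n - k - 1 by omega]
    simp

-- mapIdx over a replicate
theorem pvMapIdxReplicate {α β : Type} (n : Nat) (x : α) (f : Nat → α → β) :
    (List.replicate n x).mapIdx f = (List.range n).map (fun j => f j x) := by
  apply List.ext_getElem
  · simp
  · intro i h1 h2
    simp [List.getElem_mapIdx]

-- reverse of range, reindexed
theorem pvReverseRangeMap {α : Type} (n : Nat) (v : Nat → α) :
    (List.range n).reverse.map v = (List.range n).map (fun b => v (n - 1 - b)) := by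
  apply List.ext_getElem
  · simp
  · intro i h1 h2
    simp [List.getElem_reverse]

-- L4: the guarded accumulation over range n is the full column sum minus the skipped entry
theorem pvFoldlIfSum (h : Nat → Int) (i : Nat) :
    ∀ (n : Nat), i < n →
      (List.range n).foldl (fun s k => if k ≠ i then s + h k else s) 0
        = ((List.range n).map h).sum - h i := by
  intro n
  induction n with
  | zero => omega
  | succ n ih =>
    intro hi
    rw [List.range_succ, List.foldl_append]
    simp only [List.foldl_cons, List.foldl_nil, List.map_append, List.sum_append,
      List.map_cons, List.map_nil, List.sum_cons, List.sum_nil]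
    by_cases hin : i < n
    · rw [if_pos (by omega), ih hin]; ring
    · have hie : i = n := by omega
      subst hie
      rw [if_neg (by simp)]
      have hnot : i ∉ List.range i := by simp
      have hall : (List.range i).foldl (fun s k => if k ≠ i then s + h k else s) 0
          = ((List.range i).map h).sum := by
        have gen : ∀ (L : List Nat), i ∉ L → ∀ (s : Int),
            L.foldl (fun s k => if k ≠ i then s + h k else s) s = s + (L.map h).sum := by
          intro L
          induction L with
          | nil => intro _ s; simp
          | cons a L ihL =>
            intro hmem s
            simp only [List.foldl_cons, List.map_cons, List.sum_cons]
            rw [if_pos (by intro hc; exact hmem (hc ▸ List.mem_cons_self))]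
            rw [ihL (fun hc => hmem (List.mem_cons_of_mem _ hc))]
            ring
        simpa using gen (List.range i) hnot 0
      rw [hall]; ring

-- the first loop of A builds exactly B's rotated matrix
theorem pvRotLoop (matrix : List (List Int)) :
    (List.range matrix.length).foldl
      (fun acc i => (List.range matrix.length).foldl
        (fun acc2 j => acc2.set j ((acc2.getD j []).set (matrix.length - 1 - i)
          ((matrix.getD i []).getD j 0))) acc)
      (List.replicate matrix.length (List.replicate matrix.length 0))
    = (List.range matrix.length).map
        (fun i => (List.range matrix.length).map
          (fun j => (matrix.getD (matrix.length - 1 - j) []).getD i 0)) := by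
  set n := matrix.length with hn
  set g : Nat → Nat → Int := fun i j => (matrix.getD i []).getD j 0 with hg
  have step1 : (List.range n).foldl
      (fun acc i => (List.range n).foldl
        (fun acc2 j => acc2.set j ((acc2.getD j []).set (n - 1 - i) (g i j))) acc)
      (List.replicate n (List.replicate n (0 : Int)))
    = (List.range n).foldl
      (fun acc i => acc.mapIdx (fun j r => r.set (n - 1 - i) (g i j)))
      (List.replicate n (List.replicate n (0 : Int))) := by
    apply pvFoldlInvCongr (fun acc => acc.length = n)
    · simp
    · intro i _ acc hacc
      constructor
      · rw [pvFoldlSetRows ([] : List Int) (fun j r => r.set (n - 1 - i) (g i j)) n acc]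
        rw [List.take_of_length_le (Nat.le_of_eq hacc), List.drop_of_length_le (Nat.le_of_eq hacc)]
        simp
      · rw [pvFoldlSetRows ([] : List Int) (fun j r => r.set (n - 1 - i) (g i j)) n acc]
        simp [List.length_take, List.length_drop]; omega
  rw [step1]
  refine Eq.trans (pvFoldlMapIdx (fun i j (r : List Int) => r.set (n - 1 - i) (g i j)) (List.range n) _) ?_
  refine Eq.trans (pvMapIdxReplicate n (List.replicate n (0 : Int))
    (fun j r => (List.range n).foldl (fun r i => r.set (n - 1 - i) (g i j)) r)) ?_
  apply List.map_congr_left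
  intro j _
  rw [pvFoldlSetDesc n (fun i => g i j) _ (by simp) n (Nat.le_refl n), pvReverseRangeMap]
  simp [hg]

-- mapIdx with a value not depending on the entry is a map over the positions
theorem pvMapIdxConst {α β : Type} (w : Nat → β) (l : List α) :
    l.mapIdx (fun i _ => w i) = (List.range l.length).map w := by
  apply List.ext_getElem
  · simp
  · intro i h1 h2
    simp [List.getElem_mapIdx]

-- ===== VERDICT (by name: the statement is the Claim_ definition above) =====
theorem rotate_and_multiply_matrix_spec : Claim_equal_rotate_and_multiply_matrix := by
  intro matrix _ _
  unfold Spec_rotate_and_multiply_matrix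
  simp only [rotate_and_multiply_matrix, rotate_and_multiply_matrix_alt]
  rw [pvRotLoop]
  set n := matrix.length with hn
  set R := (List.range n).map
    (fun i => (List.range n).map (fun j => (matrix.getD (n - 1 - j) []).getD i 0)) with hR
  have hRlen : R.length = n := by rw [hR]; simp
  have hRrows : ∀ r ∈ R, r.length = n := by
    intro r hr
    rw [hR] at hr
    obtain ⟨i, _, rfl⟩ := List.mem_map.mp hr
    simp
  set w : Nat → Nat → Int := fun i j =>
    (R.getD i []).sum - (R.getD i []).getD j 0 +
      (List.range n).foldl (fun s k => if k ≠ i then s + (R.getD k []).getD j 0 else s) 0 with hw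
  have step2 : (List.range n).foldl
      (fun acc i => (List.range n).foldl
        (fun acc2 j => acc2.set i ((acc2.getD i []).set j (w i j))) acc) R
    = (List.range n).foldl (fun acc i => acc.set i ((List.range n).map (w i))) R := by
    apply pvFoldlInvCongr (fun acc => acc.length = n ∧ ∀ r ∈ acc, r.length = n)
    · exact ⟨hRlen, hRrows⟩
    · intro i hi acc ⟨h1, h2⟩
      have hin : i < n := List.mem_range.mp hi
      have hia : i < acc.length := by omega
      have hrowlen : (acc.getD i []).length = n := by
        rw [List.getD_eq_getElem _ _ hia]
        exact h2 _ (List.getElem_mem hia)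
      have hstep : (List.range n).foldl
          (fun acc2 j => acc2.set i ((acc2.getD i []).set j (w i j))) acc
          = acc.set i ((List.range n).map (w i)) := by
        rw [pvFoldlSetFixed [] (fun j r => r.set j (w i j)) i acc hia]
        have hrow : (List.range n).foldl (fun r j => r.set j (w i j)) (acc.getD i [])
            = ((acc.getD i []).take n).mapIdx (fun j _ => w i j) ++ (acc.getD i []).drop n :=
          pvFoldlSetRows 0 (fun j _ => w i j) n (acc.getD i [])
        rw [hrow, List.take_of_length_le (Nat.le_of_eq hrowlen),
          List.drop_of_length_le (Nat.le_of_eq hrowlen), List.append_nil,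
          pvMapIdxConst (w i) (acc.getD i []), hrowlen]
      refine ⟨hstep, ?_⟩
      rw [hstep]
      refine ⟨by simpa using h1, ?_⟩
      intro r hr
      rcases List.mem_or_eq_of_mem_set hr with hmem | rfl
      · exact h2 _ hmem
      · simp
  rw [step2]
  have step3 : (List.range n).foldl (fun acc i => acc.set i ((List.range n).map (w i))) R
      = (R.take n).mapIdx (fun i _ => (List.range n).map (w i)) ++ R.drop n :=
    pvFoldlSetRows [] (fun i _ => (List.range n).map (w i)) n R
  rw [step3, List.take_of_length_le (Nat.le_of_eq hRlen),
    List.drop_of_length_le (Nat.le_of_eq hRlen), List.append_nil,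
    pvMapIdxConst (fun i => (List.range n).map (w i)) R, hRlen]
  apply List.map_congr_left
  intro i hi
  apply List.map_congr_left
  intro j hj
  have hin : i < n := List.mem_range.mp hi
  have hjn : j < n := List.mem_range.mp hj
  rw [hw]
  dsimp only
  rw [pvFoldlIfSum (fun k => (R.getD k []).getD j 0) i n hin]
  have h1 : (R.map List.sum).getD i 0 = (R.getD i []).sum := by
    rw [List.getD_eq_getElem _ _ (by rw [List.length_map, hRlen]; omega),
      List.getElem_map, List.getD_eq_getElem _ _ (by omega)]
  have h2 : ((List.range n).map
      (fun j => ((List.range n).map (fun k => (R.getD k []).getD j 0)).sum)).getD j 0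
      = ((List.range n).map (fun k => (R.getD k []).getD j 0)).sum := by
    rw [List.getD_eq_getElem _ _ (by simpa using hjn), List.getElem_map, List.getElem_range]
  rw [h1, h2]
  ring
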